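-- pv_equiv track=rewrite | github.com/lizhiyi666/original | evaluations/ovr.py | _min_max_positions
-- ===== SOURCE A (Python) =====
-- from typing import Dict, List, Tuple
--
-- def _min_max_positions(cats: List) -> Tuple[Dict, Dict]:
--     """Return min_pos and max_pos dicts for categories present in cats."""
--     min_pos = {}
--     max_pos = {}
--     for i, c in enumerate(cats):
--         if c is None:
--             continue
--         if c not in min_pos:
--             min_pos[c] = i
--             max_pos[c] = i
--         else:
--             max_pos[c] = i
--     return min_pos, max_pos
-- ===== SOURCE B (Python) =====
-- from typing import Dict, List, Tuple
--
-- def _min_max_positions(cats: List) -> Tuple[Dict, Dict]: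
--     """Return min_pos and max_pos dicts for categories present in cats."""
--     positions = {}
--     for i, c in enumerate(cats):
--         if c is not None:
--             positions.setdefault(c, []).append(i)
--     min_pos = {c: idxs[0] for c, idxs in positions.items()}
--     max_pos = {c: idxs[-1] for c, idxs in positions.items()}
--     return min_pos, max_pos
-- ===== Notes on version B (the rewrite author's own statement) =====
-- stated objective: alternative
-- what changed: B first builds a full index dict mapping each non-None category to the list of all its positions (setdefault+append), then derives min_pos and max_pos in two separate reduction comprehensions (first/last element), instead of A's inline tracking of both dicts in one loop.
import Mathlib
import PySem

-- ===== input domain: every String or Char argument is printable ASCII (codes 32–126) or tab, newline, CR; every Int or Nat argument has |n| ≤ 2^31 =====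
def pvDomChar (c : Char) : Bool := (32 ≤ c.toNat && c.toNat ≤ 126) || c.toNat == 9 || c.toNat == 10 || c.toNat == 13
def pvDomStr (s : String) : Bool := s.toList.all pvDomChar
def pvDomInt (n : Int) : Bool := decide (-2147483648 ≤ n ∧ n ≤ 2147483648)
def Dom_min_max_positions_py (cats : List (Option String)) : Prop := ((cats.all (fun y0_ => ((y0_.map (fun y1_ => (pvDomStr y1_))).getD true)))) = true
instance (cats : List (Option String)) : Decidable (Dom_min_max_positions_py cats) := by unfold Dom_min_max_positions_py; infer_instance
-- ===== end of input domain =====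

-- B builds one position-index dict (category -> all indices) and then reduces it twice
-- (first / last element) instead of A's inline tracking of both dicts; alternative decomposition, same cost.


-- ===== PORT A =====
-- A's loop body: skip None; first occurrence sets both dicts, later occurrences only max_pos.
def pvStepA (st : PySem.Dict String Int × PySem.Dict String Int) (p : Int × Option String) :
    PySem.Dict String Int × PySem.Dict String Int :=
  match p.2 with
  | none => st
  | some c =>
    if st.1.contains c then (st.1, st.2.insert c p.1)
    else (st.1.insert c p.1, st.2.insert c p.1)

def min_max_positions_py (cats : List (Option String)) : (List (String × Int)) × (List (String × Int)) :=
  let st := (PySem.List.enumerate cats).foldl pvStepA (PySem.Dict.empty, PySem.Dict.empty)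
  (st.1.items, st.2.items)

-- ===== PORT B =====
-- B's loop body: positions.setdefault(c, []).append(i)  =  modify c [] (· ++ [i]).
def pvStepB (d : PySem.Dict String (List Int)) (p : Int × Option String) :
    PySem.Dict String (List Int) :=
  match p.2 with
  | none => d
  | some c => d.modify c [] (· ++ [p.1])

def min_max_positions_py_alt (cats : List (Option String)) : (List (String × Int)) × (List (String × Int)) :=
  let d := (PySem.List.enumerate cats).foldl pvStepB PySem.Dict.empty
  -- idxs[0] / idxs[-1]; every stored list is nonempty, so pyGet? is exact here
  (d.items.map (fun q => (q.1, (PySem.List.pyGet? q.2 0).getD 0)),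
   d.items.map (fun q => (q.1, (PySem.List.pyGet? q.2 (-1)).getD 0)))

-- ===== PRECONDITION & SPEC =====
def Spec_min_max_positions_py (cats : List (Option String)) (out : (List (String × Int)) × (List (String × Int))) : Prop := out = min_max_positions_py_alt cats
instance (cats : List (Option String)) (out : (List (String × Int)) × (List (String × Int))) : Decidable (Spec_min_max_positions_py cats out) := by unfold Spec_min_max_positions_py; infer_instance

-- ===== CLAIM (what is proved, stated in full; the proofs are below) =====
def Claim_equal_min_max_positions_py : Prop := ∀ (cats : List (Option String)), Dom_min_max_positions_py cats → Spec_min_max_positions_py cats (min_max_positions_py cats)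

-- ===== LEMMAS AND PROOFS =====

theorem pv_headD_append {l t : List Int} (h : l ≠ []) (d : Int) :
    (l ++ t).headD d = l.headD d := by
  cases l with
  | nil => exact absurd rfl h
  | cons a l => rfl

theorem pv_getLastD_concat (l : List Int) (b d : Int) :
    (l ++ [b]).getLastD d = b := by
  simp [List.getLastD_eq_getLast?, List.getLast?_append]

-- the loop invariant: A's two dicts are B's index dict reduced entrywise
theorem pv_inv (l : List (Int × Option String)) :
    ∀ (m x : PySem.Dict String Int) (d : PySem.Dict String (List Int)),
    d.keys.Nodup →
    m.items = d.items.map (fun q => (q.1, q.2.headD 0)) →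
    x.items = d.items.map (fun q => (q.1, q.2.getLastD 0)) →
    (∀ q ∈ d.items, q.2 ≠ []) →
    (l.foldl pvStepB d).keys.Nodup ∧
    (l.foldl pvStepA (m, x)).1.items = (l.foldl pvStepB d).items.map (fun q => (q.1, q.2.headD 0)) ∧
    (l.foldl pvStepA (m, x)).2.items = (l.foldl pvStepB d).items.map (fun q => (q.1, q.2.getLastD 0)) ∧
    (∀ q ∈ (l.foldl pvStepB d).items, q.2 ≠ []) := by
  induction l with
  | nil => intro m x d h1 h2 h3 h4; exact ⟨h1, h2, h3, h4⟩
  | cons p l ih =>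
    intro m x d h1 h2 h3 h4
    obtain ⟨i, oc⟩ := p
    cases oc with
    | none =>
      simp only [List.foldl_cons, pvStepA, pvStepB]
      exact ih m x d h1 h2 h3 h4
    | some c =>
      have hkm : m.keys = d.keys := by
        simp only [PySem.Dict.keys, h2, List.map_map]; rfl
      have hkx : x.keys = d.keys := by
        simp only [PySem.Dict.keys, h3, List.map_map]; rfl
      have hcm : m.contains c = d.contains c := by
        rw [PySem.Dict.contains_eq_decide_mem_keys, PySem.Dict.contains_eq_decide_mem_keys, hkm]
      have hcx : x.contains c = d.contains c := by
        rw [PySem.Dict.contains_eq_decide_mem_keys, PySem.Dict.contains_eq_decide_mem_keys, hkx]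
      have hmod : d.modify c [] (fun v => v ++ [i]) = d.insert c (d.getD c [] ++ [i]) := rfl
      by_cases hc : d.contains c = true
      · -- repeated category: A updates only max_pos, B appends to the index list
        cases hget : d.get? c with
        | none =>
          rw [PySem.Dict.get?_eq_none_iff_contains] at hget
          exact absurd hc (by simp [hget])
        | some v =>
        have hvmem : (c, v) ∈ d.items := PySem.Dict.mem_items_of_get?_eq_some _ hget
        have hgd : d.getD c [] = v := by simp [PySem.Dict.getD, hget]
        have hvne : v ≠ [] := h4 (c, v) hvmem
        simp only [List.foldl_cons, pvStepA, pvStepB, hcm, hc, if_pos]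
        rw [hmod, hgd]
        apply ih
        · rw [PySem.Dict.keys_insert_of_contains _ _ hc]; exact h1
        · rw [PySem.Dict.items_insert_of_contains _ _ hc, List.map_map, h2]
          apply List.map_congr_left
          intro q hq
          simp only [Function.comp]
          by_cases hq1 : q.1 = c
          · have : d.get? q.1 = some q.2 := PySem.Dict.get?_of_mem_items _ hq h1
            rw [hq1] at this
            have hv2 : v = q.2 := by rw [hget] at this; exact Option.some_inj.mp this
            have hbeq : (q.1 == c) = true := beq_iff_eq.mpr hq1
            simp only [hbeq, if_true]
            rw [pv_headD_append hvne, hq1, ← hv2]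
          · have hbeq : (q.1 == c) = false := beq_eq_false_iff_ne.mpr hq1
            simp only [hbeq]
            rfl
        · have hcx' : x.contains c = true := by rw [hcx]; exact hc
          rw [PySem.Dict.items_insert_of_contains _ _ hcx',
              PySem.Dict.items_insert_of_contains _ _ hc, h3,
              List.map_map, List.map_map]
          apply List.map_congr_left
          intro q hq
          simp only [Function.comp]
          by_cases hq1 : q.1 = c
          · have hbeq : (q.1 == c) = true := beq_iff_eq.mpr hq1
            simp only [hbeq, if_true]
            rw [pv_getLastD_concat]
          · have hbeq : (q.1 == c) = false := beq_eq_false_iff_ne.mpr hq1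
            simp only [hbeq]
            rfl
        · intro q hq
          rw [PySem.Dict.items_insert_of_contains _ _ hc] at hq
          obtain ⟨r, hr, hrq⟩ := List.mem_map.mp hq
          by_cases hr1 : (r.1 == c) = true
          · rw [if_pos hr1] at hrq
            rw [← hrq]; simp
          · rw [if_neg (by simp [hr1])] at hrq
            rw [← hrq]; exact h4 r hr
      · -- first occurrence: all three dicts append a fresh key
        have hc' : d.contains c = false := by simpa using hc
        have hcm' : m.contains c = false := by rw [hcm]; exact hc'
        have hcx' : x.contains c = false := by rw [hcx]; exact hc'
        have hget : d.get? c = none := by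
          rw [PySem.Dict.get?_eq_none_iff_contains, hc']
        have hgd : d.getD c [] = [] := by simp [PySem.Dict.getD, hget]
        simp only [List.foldl_cons, pvStepA, pvStepB, hcm', Bool.false_eq_true, if_neg,
          not_false_eq_true]
        rw [hmod, hgd]
        apply ih
        · rw [PySem.Dict.keys_insert_of_not_contains _ _ hc']
          have hnotmem : c ∉ d.keys := by
            intro hmem
            rw [PySem.Dict.contains_eq_decide_mem_keys] at hc'
            simp [hmem] at hc'
          refine List.nodup_append.mpr ⟨h1, List.nodup_singleton c, ?_⟩
          intro a ha b hb
          rw [List.mem_singleton] at hb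
          subst hb
          exact fun hac => hnotmem (hac ▸ ha)
        · rw [PySem.Dict.items_insert_of_not_contains _ _ hc',
              PySem.Dict.items_insert_of_not_contains _ _ hcm', h2, List.map_append]
          rfl
        · rw [PySem.Dict.items_insert_of_not_contains _ _ hc',
              PySem.Dict.items_insert_of_not_contains _ _ hcx', h3, List.map_append]
          rfl
        · intro q hq
          rw [PySem.Dict.items_insert_of_not_contains _ _ hc', List.mem_append] at hq
          cases hq with
          | inl h => exact h4 q h
          | inr h => simp at h; rw [h]; simp

theorem pv_pyGet_zero (l : List Int) (h : l ≠ []) :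
    (PySem.List.pyGet? l 0).getD 0 = l.headD 0 := by
  cases l with
  | nil => exact absurd rfl h
  | cons a t => simp [PySem.List.pyGet?, PySem.List.pyIdx?]

theorem pv_pyGet_neg1 (l : List Int) (h : l ≠ []) :
    (PySem.List.pyGet? l (-1)).getD 0 = l.getLastD 0 := by
  have hlen : 1 ≤ l.length := List.length_pos_iff.mpr h
  have hle : -(l.length : Int) ≤ -1 := by
    have : (1 : Int) ≤ (l.length : Int) := by exact_mod_cast hlen
    omega
  have hget : PySem.List.pyGet? l (-1) = l.getLast? := by
    simp only [PySem.List.pyGet?, PySem.List.pyIdx?]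
    rw [if_neg (by norm_num), if_pos hle]
    simp [List.getLast?_eq_getElem?]
  rw [hget, List.getLastD_eq_getLast?]

-- ===== VERDICT (by name: the statement is the Claim_ definition above) =====
theorem min_max_positions_py_spec : Claim_equal_min_max_positions_py := by
  intro cats _
  unfold Spec_min_max_positions_py
  simp only [min_max_positions_py, min_max_positions_py_alt]
  obtain ⟨h1, h2, h3, h4⟩ := pv_inv (PySem.List.enumerate cats)
    PySem.Dict.empty PySem.Dict.empty PySem.Dict.empty
    (by exact List.nodup_nil) (by rfl) (by rfl) (by intro q hq; cases hq)
  refine Prod.ext ?_ ?_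
  · simp only []
    rw [h2]
    apply List.map_congr_left
    intro q hq
    rw [pv_pyGet_zero q.2 (h4 q hq)]
  · simp only []
    rw [h3]
    apply List.map_congr_left
    intro q hq
    rw [pv_pyGet_neg1 q.2 (h4 q hq)]
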